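-- pv_equiv track=rewrite | github.com/david-acker/advent-of-code-2024 | solutions/day2/main.py | get_invalid_indices
-- ===== SOURCE A (Python) =====
-- from typing import List, Set
--
-- def get_invalid_indices(values: List[int], ascending: bool) -> Set[int]:
--     invalid_indices: Set[int] = set()
--
--     for i in range(len(values) - 1):
--         start = values[i]
--         end = values[i + 1]
--
--         difference = start - end
--
--         if (((difference < 0 and ascending) or
--             (difference > 0 and not ascending)) or
--             (difference == 0 or abs(difference) > 3)):
--             invalid_indices.add(i)
--             if (i > 0):
--                 invalid_indices.add(i - 1)
--             invalid_indices.add(i + 1)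
--
--     return invalid_indices
-- ===== SOURCE B (Python) =====
-- from typing import List, Set
--
--
-- def _is_bad(d: int, ascending: bool) -> bool:
--     return (d < 0 and ascending) or (d > 0 and not ascending) or d == 0 or abs(d) > 3
--
--
-- def get_invalid_indices(values: List[int], ascending: bool) -> Set[int]:
--     n = len(values)
--     bad = [_is_bad(values[i] - values[i + 1], ascending) for i in range(n - 1)]
--     return {j for j in range(n)
--             if (j > 0 and bad[j - 1])
--             or (j < n - 1 and bad[j])
--             or (j + 1 < n - 1 and bad[j + 1])}
-- ===== Notes on version B (the rewrite author's own statement) =====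
-- stated objective: alternative
-- what changed: A scans adjacent pairs and taints the three surrounding indices of each bad pair; B first builds a boolean table of bad pairs and then scans element indices once, admitting an index when any incident pair flag is set.
import Mathlib
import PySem

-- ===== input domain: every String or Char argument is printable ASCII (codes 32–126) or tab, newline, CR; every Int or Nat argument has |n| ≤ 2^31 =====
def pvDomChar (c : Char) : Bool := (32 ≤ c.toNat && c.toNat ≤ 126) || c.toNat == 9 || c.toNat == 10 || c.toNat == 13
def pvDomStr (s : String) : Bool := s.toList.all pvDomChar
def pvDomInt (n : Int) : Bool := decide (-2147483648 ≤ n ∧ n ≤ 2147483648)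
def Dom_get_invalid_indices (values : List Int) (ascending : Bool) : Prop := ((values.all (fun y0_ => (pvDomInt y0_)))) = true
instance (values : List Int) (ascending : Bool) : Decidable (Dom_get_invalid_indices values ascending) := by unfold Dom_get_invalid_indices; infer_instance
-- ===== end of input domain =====

-- B replaces A's edge-scan-and-taint with a precomputed bad-pair table read once per element index (alternative decomposition, same cost).
-- Both Pythons return a set; Python's set iteration order is not modelled, so both ports list the set in ascending order (outputs are compared as finite sets).

-- ===== PORT A =====
def get_invalid_indices (values : List Int) (ascending : Bool) : List Int :=
  let invalid_indices : PySem.Set Int :=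
    (PySem.List.pyRange 0 (PySem.List.len values - 1) 1).foldl
      (fun (s : PySem.Set Int) i =>
        let start := PySem.List.pyGetD values i 0
        let end_ := PySem.List.pyGetD values (i + 1) 0
        let difference := start - end_
        if ((decide (difference < 0) && ascending) || (decide (0 < difference) && !ascending))
            || (decide (difference = 0) || decide (3 < |difference|)) then
          let s := PySem.Set.add s i
          let s := if decide (0 < i) then PySem.Set.add s (i - 1) else s
          PySem.Set.add s (i + 1)
        else s)
      PySem.Set.empty
  -- return invalid_indices : the set, listed in ascending order
  PySem.List.sorted invalid_indices (fun x => x) false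

-- ===== PORT B =====
def pv_is_bad (d : Int) (ascending : Bool) : Bool :=
  ((decide (d < 0) && ascending) || (decide (0 < d) && !ascending))
    || (decide (d = 0) || decide (3 < |d|))

def get_invalid_indices_alt (values : List Int) (ascending : Bool) : List Int :=
  let n : Int := PySem.List.len values
  let bad : List Bool :=
    (PySem.List.pyRange 0 (n - 1) 1).map
      (fun i => pv_is_bad (PySem.List.pyGetD values i 0 - PySem.List.pyGetD values (i + 1) 0) ascending)
  -- the set comprehension ranges over strictly increasing distinct j: the set, listed in ascending order
  (PySem.List.pyRange 0 n 1).filter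
    (fun j =>
      (decide (0 < j) && PySem.List.pyGetD bad (j - 1) false)
        || (decide (j < n - 1) && PySem.List.pyGetD bad j false)
        || (decide (j + 1 < n - 1) && PySem.List.pyGetD bad (j + 1) false))

-- ===== PRECONDITION & SPEC =====
def Spec_get_invalid_indices (values : List Int) (ascending : Bool) (out : List Int) : Prop := out = get_invalid_indices_alt values ascending
instance (values : List Int) (ascending : Bool) (out : List Int) : Decidable (Spec_get_invalid_indices values ascending out) := by unfold Spec_get_invalid_indices; infer_instance

-- ===== CLAIM (what is proved, stated in full; the proofs are below) =====
def Claim_equal_get_invalid_indices : Prop := ∀ (values : List Int) (ascending : Bool), Dom_get_invalid_indices values ascending → Spec_get_invalid_indices values ascending (get_invalid_indices values ascending)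

-- ===== LEMMAS AND PROOFS =====

-- the bad-pair condition at pair index i (proof-side abbreviation)
def pvBadAt (values : List Int) (ascending : Bool) (i : Int) : Bool :=
  pv_is_bad (PySem.List.pyGetD values i 0 - PySem.List.pyGetD values (i + 1) 0) ascending

-- A's loop step (zeta-reduced), as a named function for the lemmas
def pvStep (values : List Int) (ascending : Bool) (s : PySem.Set Int) (i : Int) : PySem.Set Int :=
  if ((decide (PySem.List.pyGetD values i 0 - PySem.List.pyGetD values (i + 1) 0 < 0) && ascending)
        || (decide (0 < PySem.List.pyGetD values i 0 - PySem.List.pyGetD values (i + 1) 0) && !ascending))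
      || (decide (PySem.List.pyGetD values i 0 - PySem.List.pyGetD values (i + 1) 0 = 0)
        || decide (3 < |PySem.List.pyGetD values i 0 - PySem.List.pyGetD values (i + 1) 0|)) then
    PySem.Set.add
      (if decide (0 < i) then PySem.Set.add (PySem.Set.add s i) (i - 1) else PySem.Set.add s i)
      (i + 1)
  else s

lemma pvStep_nodup (values : List Int) (ascending : Bool) (l : List Int) (s : PySem.Set Int)
    (hs : s.Nodup) : (l.foldl (pvStep values ascending) s).Nodup := by
  induction l generalizing s with
  | nil => exact hs
  | cons a l ih =>
      apply ih
      unfold pvStep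
      split_ifs <;> first
        | exact hs
        | exact PySem.Set.nodup_add _ _ (PySem.Set.nodup_add _ _ (PySem.Set.nodup_add _ _ hs))
        | exact PySem.Set.nodup_add _ _ (PySem.Set.nodup_add _ _ hs)


lemma pv_mem_pvStep (values : List Int) (ascending : Bool) (s : PySem.Set Int) (a x : Int) :
    x ∈ pvStep values ascending s a ↔
      x ∈ s ∨ (pvBadAt values ascending a = true ∧ (x = a ∨ (0 < a ∧ x = a - 1) ∨ x = a + 1)) := by
  have h : pvStep values ascending s a =
      if pvBadAt values ascending a then
        PySem.Set.add
          (if decide (0 < a) then PySem.Set.add (PySem.Set.add s a) (a - 1) else PySem.Set.add s a)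
          (a + 1)
      else s := rfl
  rw [h]
  split_ifs with hb h0
  · simp only [PySem.Set.mem_add, decide_eq_true_eq] at *
    constructor
    · rintro (((h|h)|h)|h)
      · exact Or.inl h
      · exact Or.inr ⟨hb, Or.inl h⟩
      · exact Or.inr ⟨hb, Or.inr (Or.inl ⟨h0, h⟩)⟩
      · exact Or.inr ⟨hb, Or.inr (Or.inr h)⟩
    · rintro (h|⟨-, (h|⟨-,h⟩|h)⟩)
      · exact Or.inl (Or.inl (Or.inl h))
      · exact Or.inl (Or.inl (Or.inr h))
      · exact Or.inl (Or.inr h)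
      · exact Or.inr h
  · simp only [PySem.Set.mem_add, decide_eq_true_eq] at *
    constructor
    · rintro ((h|h)|h)
      · exact Or.inl h
      · exact Or.inr ⟨hb, Or.inl h⟩
      · exact Or.inr ⟨hb, Or.inr (Or.inr h)⟩
    · rintro (h|⟨-, (h|⟨h',-⟩|h)⟩)
      · exact Or.inl (Or.inl h)
      · exact Or.inl (Or.inr h)
      · exact absurd h' h0
      · exact Or.inr h
  · simp [hb]

lemma pvStep_mem (values : List Int) (ascending : Bool) (l : List Int) (s : PySem.Set Int) (x : Int) :
    x ∈ l.foldl (pvStep values ascending) s ↔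
      x ∈ s ∨ ∃ i ∈ l, pvBadAt values ascending i = true ∧
        (x = i ∨ (0 < i ∧ x = i - 1) ∨ x = i + 1) := by
  induction l generalizing s with
  | nil => simp
  | cons a l ih =>
      rw [List.foldl_cons, ih, pv_mem_pvStep]
      simp only [List.mem_cons]
      constructor
      · rintro ((h|h)|⟨i,hi,h⟩)
        · exact Or.inl h
        · exact Or.inr ⟨a, Or.inl rfl, h⟩
        · exact Or.inr ⟨i, Or.inr hi, h⟩
      · rintro (h|⟨i,(rfl|hi),h⟩)
        · exact Or.inl (Or.inl h)
        · exact Or.inl (Or.inr h)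
        · exact Or.inr ⟨i, hi, h⟩

-- B's bad-pair table and filter predicate (zeta-reduced), as named functions for the lemmas
def pvBadTbl (values : List Int) (ascending : Bool) : List Bool :=
  (PySem.List.pyRange 0 (PySem.List.len values - 1) 1).map
    (fun i => pv_is_bad (PySem.List.pyGetD values i 0 - PySem.List.pyGetD values (i + 1) 0) ascending)

def pvPred (values : List Int) (ascending : Bool) (j : Int) : Bool :=
  (decide (0 < j) && PySem.List.pyGetD (pvBadTbl values ascending) (j - 1) false)
    || (decide (j < PySem.List.len values - 1) && PySem.List.pyGetD (pvBadTbl values ascending) j false)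
    || (decide (j + 1 < PySem.List.len values - 1) && PySem.List.pyGetD (pvBadTbl values ascending) (j + 1) false)

lemma pvBadTbl_lookup (values : List Int) (ascending : Bool) (k : Int)
    (h1 : 0 ≤ k) (h2 : k < PySem.List.len values - 1) :
    PySem.List.pyGetD (pvBadTbl values ascending) k false = pvBadAt values ascending k := by
  unfold pvBadTbl
  exact PySem.List.pyGetD_map_pyRange_of_nonneg _ _ _ _ h1 h2

theorem get_invalid_indices_eq (values : List Int) (ascending : Bool) :
    get_invalid_indices values ascending = get_invalid_indices_alt values ascending := by
  have hA : get_invalid_indices values ascending =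
      PySem.List.sorted
        ((PySem.List.pyRange 0 (PySem.List.len values - 1) 1).foldl
          (pvStep values ascending) PySem.Set.empty) (fun x => x) false := rfl
  have hB : get_invalid_indices_alt values ascending =
      (PySem.List.pyRange 0 (PySem.List.len values) 1).filter (pvPred values ascending) := rfl
  rw [hA, hB]
  have hNA : ((PySem.List.pyRange 0 (PySem.List.len values - 1) 1).foldl
      (pvStep values ascending) PySem.Set.empty).Nodup :=
    pvStep_nodup values ascending _ _ List.nodup_nil
  have hNB : ((PySem.List.pyRange 0 (PySem.List.len values) 1).filter
      (pvPred values ascending)).Nodup :=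
    (PySem.List.nodup_pyRange_one 0 (PySem.List.len values)).filter _
  apply PySem.List.sorted_eq_of_perm_of_pairwise_lt
  · rw [List.perm_ext_iff_of_nodup hNB hNA]
    intro x
    rw [List.mem_filter, pvStep_mem, PySem.List.mem_pyRange_one]
    simp only [PySem.List.mem_pyRange_one, PySem.Set.empty, List.not_mem_nil, false_or]
    constructor
    · rintro ⟨⟨hx0, hxn⟩, hp⟩
      unfold pvPred at hp
      simp only [Bool.or_eq_true, Bool.and_eq_true, decide_eq_true_eq] at hp
      rcases hp with (⟨hgt, htbl⟩ | ⟨hlt, htbl⟩) | ⟨hlt, htbl⟩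
      · exact ⟨x - 1, ⟨by omega, by omega⟩,
          by rwa [pvBadTbl_lookup values ascending _ (by omega) (by omega)] at htbl,
          Or.inr (Or.inr (by omega))⟩
      · exact ⟨x, ⟨hx0, hlt⟩,
          by rwa [pvBadTbl_lookup values ascending _ hx0 hlt] at htbl, Or.inl rfl⟩
      · exact ⟨x + 1, ⟨by omega, hlt⟩,
          by rwa [pvBadTbl_lookup values ascending _ (by omega) hlt] at htbl,
          Or.inr (Or.inl ⟨by omega, by omega⟩)⟩
    · rintro ⟨i, ⟨hi0, hin⟩, hbad, hx⟩
      refine ⟨by omega, ?_⟩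
      unfold pvPred
      simp only [Bool.or_eq_true, Bool.and_eq_true, decide_eq_true_eq]
      rcases hx with rfl | ⟨hi, rfl⟩ | rfl
      · exact Or.inl (Or.inr ⟨hin, by rwa [pvBadTbl_lookup values ascending _ hi0 hin]⟩)
      · exact Or.inr ⟨by omega,
          by rw [pvBadTbl_lookup values ascending _ (by omega) (by omega)]
             simpa using hbad⟩
      · refine Or.inl (Or.inl ⟨by omega, ?_⟩)
        have he : i + 1 - 1 = i := by omega
        rw [he, pvBadTbl_lookup values ascending _ hi0 hin]
        exact hbad
  · exact (PySem.List.pairwise_lt_pyRange_one 0 (PySem.List.len values)).filter _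

-- ===== VERDICT (by name: the statement is the Claim_ definition above) =====
theorem get_invalid_indices_spec : Claim_equal_get_invalid_indices := by
  intro values ascending _
  exact get_invalid_indices_eq values ascending
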